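-- pv_equiv track=rewrite | github.com/flaviu2001/University-Projects | Semester 1/Fundamentals of Programming/Labs/Assignment 1/set 3.py | count
-- ===== SOURCE A (Python) =====
-- def isprime(n):
-- 	'''
-- 	This function takes an integer parameter n,
-- 	checks whether it is prime and returns a boolean
-- 	value of True if the number is prime, False otherwise
-- 	'''
-- 	if n < 2:
-- 		return False
-- 	i = 2
-- 	while i*i <= n:
-- 		if n%i == 0:
-- 			return False
-- 		i += 1
-- 	return True
--
-- def count(n):
-- 	'''
-- 	This function takes an integer parameter n and
-- 	returns how many prime factors have all the numbers
-- 	between 1 and n in total. 1 is considered to have 1 factor and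
-- 	it is 1.
-- 	'''
-- 	if n < 1:
-- 		return 0
-- 	cnt = 1+n//2
-- 	for i in range(3, n+1, 2):
-- 		if isprime(i):
-- 			cnt += n//i
-- 	return cnt
-- ===== SOURCE B (Python) =====
-- def _build_sieve(n):
--     '''Sieve of Eratosthenes: sieve[m] is True iff m is prime, for 2 <= m <= n.'''
--     sieve = [True] * (n + 1)
--     for i in range(2, n + 1):
--         if sieve[i]:
--             for j in range(i * i, n + 1, i):
--                 sieve[j] = False
--     return sieve
--
-- def count(n):
--     if n < 1:
--         return 0
--     sieve = _build_sieve(n)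
--     total = 1
--     for p in range(2, n + 1):
--         if sieve[p]:
--             total += n // p
--     return total
-- ===== Notes on version B (the rewrite author's own statement) =====
-- stated objective: faster
-- what changed: replaced the per-number trial-division primality test inside the summation loop by a single Sieve of Eratosthenes built up front, then one pass summing n//p over the sieve's primes
import Mathlib
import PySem

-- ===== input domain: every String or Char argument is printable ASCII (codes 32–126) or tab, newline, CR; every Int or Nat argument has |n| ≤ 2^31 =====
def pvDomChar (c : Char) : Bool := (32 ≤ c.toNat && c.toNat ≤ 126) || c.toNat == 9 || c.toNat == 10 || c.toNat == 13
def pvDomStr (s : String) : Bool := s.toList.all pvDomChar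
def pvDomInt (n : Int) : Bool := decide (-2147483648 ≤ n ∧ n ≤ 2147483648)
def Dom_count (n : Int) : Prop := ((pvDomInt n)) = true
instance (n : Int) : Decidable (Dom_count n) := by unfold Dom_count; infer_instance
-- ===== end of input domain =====

-- B replaces A's per-number trial-division primality test by a Sieve of Eratosthenes
-- built once, then a single pass summing n // p over its primes (objective: faster).


-- ===== PORT A =====
-- while i*i <= n: if n % i == 0: return False; i += 1
def isprimeLoop (n i : Int) : Bool :=
  if _h : i * i ≤ n then
    if PySem.Int.mod n i = 0 then false
    else isprimeLoop n (i + 1)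
  else true
termination_by (n + 1 - i).toNat
decreasing_by
  have : i ≤ n := by nlinarith [sq_nonneg (i - 1)]
  omega

def isprime (n : Int) : Bool :=
  if n < 2 then false else isprimeLoop n 2

def count (n : Int) : Int :=
  if n < 1 then 0
  else
    (PySem.List.pyRange 3 (n + 1) 2).foldl
      (fun cnt i => if isprime i then cnt + PySem.Int.floordiv n i else cnt)
      (1 + PySem.Int.floordiv n 2)

-- ===== PORT B =====
-- for j in range(i*i, n+1, i): sieve[j] = False   (indices are always in bounds)
def sieveInner (n i : Int) (s : Array Bool) : Array Bool :=
  (PySem.List.pyRange (i * i) (n + 1) i).foldl (fun s' j => s'.setIfInBounds j.toNat false) s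

-- sieve = [True]*(n+1); for i in range(2, n+1): if sieve[i]: mark multiples of i
def sieveBuild (n : Int) : Array Bool :=
  (PySem.List.pyRange 2 (n + 1) 1).foldl
    (fun s i => if s.getD i.toNat false then sieveInner n i s else s)
    (Array.replicate (n + 1).toNat true)

def count_alt (n : Int) : Int :=
  if n < 1 then 0
  else
    let sieve := sieveBuild n
    (PySem.List.pyRange 2 (n + 1) 1).foldl
      (fun total p => if sieve.getD p.toNat false then total + PySem.Int.floordiv n p else total)
      1

-- ===== PRECONDITION & SPEC =====
def Spec_count (n : Int) (out : Int) : Prop := out = count_alt n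
instance (n : Int) (out : Int) : Decidable (Spec_count n out) := by unfold Spec_count; infer_instance

-- ===== CLAIM (what is proved, stated in full; the proofs are below) =====
def Claim_equal_count : Prop := ∀ (n : Int), Dom_count n → Spec_count n (count n)

-- ===== LEMMAS AND PROOFS =====

-- A number ≥ 2 is prime iff it has no prime factor p with p*p ≤ it.
lemma prime_iff_no_small_factor (m : Nat) (hm : 2 ≤ m) :
    Nat.Prime m ↔ ¬ ∃ p : Nat, p.Prime ∧ p ∣ m ∧ p * p ≤ m := by
  constructor
  · rintro hp ⟨p, hpp, hdvd, hle⟩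
    have hpm := (Nat.prime_dvd_prime_iff_eq hpp hp).mp hdvd
    subst hpm
    nlinarith
  · intro h
    by_contra hnp
    refine h ⟨m.minFac, Nat.minFac_prime (by omega), Nat.minFac_dvd m, ?_⟩
    have := Nat.minFac_sq_le_self (by omega) hnp
    nlinarith [this]

-- any prime factor p of m with p*p ≤ m is in fact smaller than m
lemma small_factor_lt {p m : Nat} (hp : p.Prime) (hle : p * p ≤ m) : p < m := by
  have h2 := hp.two_le
  nlinarith

-- the trial-division loop returns true iff no divisor d ≥ i with d*d ≤ n exists
lemma isprimeLoop_spec (n : Int) :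
    ∀ M : Nat, ∀ i : Int, (n + 1 - i).toNat = M → 2 ≤ i →
    (isprimeLoop n i = true ↔ ∀ d : Int, i ≤ d → d * d ≤ n → ¬ d ∣ n) := by
  intro M
  induction M using Nat.strong_induction_on with
  | _ M IH =>
    intro i hM hi
    rw [isprimeLoop]
    split_ifs with h1 h2
    · simp only [false_iff]
      exact fun hall => hall i le_rfl h1 ((PySem.Int.mod_eq_zero_iff_dvd n i).mp h2)
    · have hin : i ≤ n := by nlinarith [sq_nonneg (i - 1)]
      have hlt : (n + 1 - (i + 1)).toNat < M := by omega
      rw [IH _ hlt (i + 1) rfl (by omega)]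
      constructor
      · intro h d hd hdd
        rcases eq_or_lt_of_le hd with rfl | hlt'
        · exact fun hdvd => h2 ((PySem.Int.mod_eq_zero_iff_dvd n i).mpr hdvd)
        · exact h d (by omega) hdd
      · intro h d hd hdd
        exact h d (by omega) hdd
    · simp only [true_iff]
      intro d hd hdd
      have : i * i ≤ d * d := by nlinarith
      exact fun _ => h1 (le_trans this hdd)

lemma isprime_eq (k : Int) : isprime k = decide (Nat.Prime k.toNat) := by
  unfold isprime
  split_ifs with h
  · have : k.toNat = 0 ∨ k.toNat = 1 := by omega
    rcases this with h' | h' <;> simp [h', Nat.not_prime_zero, Nat.not_prime_one]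
  · rw [not_lt] at h
    have hk : ((k.toNat : Int)) = k := Int.toNat_of_nonneg (by omega)
    have hk2 : 2 ≤ k.toNat := by omega
    rw [Bool.eq_iff_iff, isprimeLoop_spec k (k + 1 - 2).toNat 2 rfl (by omega),
      decide_eq_true_iff]
    constructor
    · intro hnod
      rw [Nat.prime_def_le_sqrt]
      refine ⟨hk2, fun e he hes => ?_⟩
      rw [Nat.le_sqrt] at hes
      intro hdvd
      refine hnod (e : Int) (by exact_mod_cast he) ?_ ?_
      · rw [← hk]; exact_mod_cast hes
      · rw [← hk]; exact_mod_cast hdvd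
    · intro hp d hd hdd hdvd
      rw [Nat.prime_def_le_sqrt] at hp
      have hd0 : ((d.toNat : Int)) = d := Int.toNat_of_nonneg (by omega)
      refine hp.2 d.toNat (by omega) ?_ ?_
      · rw [Nat.le_sqrt]
        have : (d.toNat : Int) * (d.toNat : Int) ≤ (k.toNat : Int) := by
          rw [hd0, hk]; exact hdd
        exact_mod_cast this
      · have : (d.toNat : Int) ∣ (k.toNat : Int) := by rw [hd0, hk]; exact hdvd
        exact_mod_cast this

-- the marking loop sets exactly the listed (nonnegative) indices to false
lemma foldl_set_false_getD (L : List Int) (hL : ∀ j ∈ L, 0 ≤ j) :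
    ∀ (s : Array Bool) (m : Nat),
    (L.foldl (fun s' j => s'.setIfInBounds j.toNat false) s).getD m false
      = if (m : Int) ∈ L then false else s.getD m false := by
  induction L with
  | nil => intro s m; simp
  | cons j L IH =>
    intro s m
    simp only [List.foldl_cons]
    rw [IH (fun x hx => hL x (List.mem_cons_of_mem j hx))]
    by_cases hj : (m : Int) = j
    · have hjm : j.toNat = m := by
        have := hL j (List.mem_cons_self ..)
        omega
      have hset : ((s.setIfInBounds j.toNat false).getD m false) = false := by
        subst hjm
        simp only [Array.getD_eq_getD_getElem?, Array.getElem?_setIfInBounds]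
        split_ifs with h' h'' <;> simp_all [le_of_not_gt]
      rw [if_pos (by simp [hj] : ((m : Int)) ∈ j :: L)]
      split_ifs with hmL
      · rfl
      · exact hset
    · have hjm : j.toNat ≠ m := by
        have := hL j (List.mem_cons_self ..)
        omega
      have hset : ((s.setIfInBounds j.toNat false).getD m false) = s.getD m false := by
        simp only [Array.getD_eq_getD_getElem?, Array.getElem?_setIfInBounds]
        simp [hjm]
      rw [hset]
      simp [List.mem_cons, hj]

lemma sieveInner_getD (n i : Int) (hi : 2 ≤ i) (s : Array Bool) (m : Nat) :
    (sieveInner n i s).getD m false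
      = if (i ∣ (m : Int) ∧ i * i ≤ (m : Int) ∧ (m : Int) < n + 1) then false
        else s.getD m false := by
  have hpos : (0:Int) < i := by omega
  unfold sieveInner
  rw [foldl_set_false_getD _ (fun j hj => by
    have := (PySem.List.mem_pyRange_iff_of_pos hpos j).mp hj
    nlinarith [this.1])]
  have hmem : ((m : Int) ∈ PySem.List.pyRange (i * i) (n + 1) i)
      ↔ (i ∣ (m : Int) ∧ i * i ≤ (m : Int) ∧ (m : Int) < n + 1) := by
    rw [PySem.List.mem_pyRange_iff_of_pos hpos]
    constructor
    · rintro ⟨h1, h2, h3⟩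
      refine ⟨?_, h1, h2⟩
      have : (m : Int) = ((m : Int) - i * i) + i * i := by ring
      rw [this]
      exact dvd_add h3 (dvd_mul_right i i)
    · rintro ⟨h1, h2, h3⟩
      exact ⟨h2, h3, dvd_sub h1 (dvd_mul_right i i)⟩
  rw [if_congr hmem rfl rfl]

-- the sieve invariant after processing i = 2 .. K-1
lemma sieve_inv (n : Int) (hn : 1 ≤ n) :
    ∀ KM : Nat, ∀ K : Int, K = 2 + (KM : Int) → K ≤ n + 1 →
    ∀ m : Nat, m < (n + 1).toNat →
    (((PySem.List.pyRange 2 K 1).foldl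
        (fun s i => if s.getD i.toNat false then sieveInner n i s else s)
        (Array.replicate (n + 1).toNat true)).getD m false = true
      ↔ ¬ ∃ p : Nat, p.Prime ∧ (p : Int) < K ∧ p ∣ m ∧ p * p ≤ m) := by
  intro KM
  induction KM with
  | zero =>
    intro K hK hKn m hm
    have hK2 : K = 2 := by push_cast at hK; omega
    subst hK2
    rw [PySem.List.pyRange_one_eq_nil (le_refl 2)]
    simp only [List.foldl_nil]
    have hg : (Array.replicate (n + 1).toNat true).getD m false = true := by
      simp [Array.getD_eq_getD_getElem?, hm]
    rw [hg]
    simp only [true_iff]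
    rintro ⟨p, hp, hlt, -, -⟩
    have h2 : 2 ≤ p := hp.two_le
    have h2' : (2:Int) ≤ (p:Int) := by exact_mod_cast h2
    omega
  | succ KM IH =>
    intro K hK hKn m hm
    have hK' : K = (2 + (KM : Int)) + 1 := by push_cast [hK]; ring
    set K' : Int := 2 + (KM : Int) with hKdef
    have hK'2 : 2 ≤ K' := by omega
    have hK'n : K' ≤ n + 1 := by omega
    have hrange : PySem.List.pyRange 2 K 1
        = PySem.List.pyRange 2 K' 1 ++ [K'] := by
      rw [hK']
      exact PySem.List.pyRange_one_succ_right hK'2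
    rw [hrange, List.foldl_append]
    simp only [List.foldl_cons, List.foldl_nil]
    set prev := (PySem.List.pyRange 2 K' 1).foldl
        (fun s i => if s.getD i.toNat false then sieveInner n i s else s)
        (Array.replicate (n + 1).toNat true) with hprev
    have hkcast : ((K'.toNat : Int)) = K' := Int.toNat_of_nonneg (by omega)
    have hkN : K'.toNat < (n + 1).toNat := by omega
    have IHk := IH K' rfl (by omega) K'.toNat hkN
    have IHm := IH K' rfl (by omega) m hm
    by_cases hs : prev.getD K'.toNat false = true
    · -- K' survived: it is prime
      have hnoex := IHk.mp hs
      have hKprime : Nat.Prime K'.toNat := by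
        rw [prime_iff_no_small_factor K'.toNat (by omega)]
        rintro ⟨p, hp, hdvd, hle⟩
        have hplt : p < K'.toNat := small_factor_lt hp hle
        exact hnoex ⟨p, hp, by omega, hdvd, hle⟩
      rw [if_pos hs]
      rw [sieveInner_getD n K' hK'2 prev m]
      have hmlt : (m : Int) < n + 1 := by omega
      constructor
      · intro h
        rintro ⟨p, hp, hplt, hdvd, hle⟩
        by_cases hcond : K' ∣ (m : Int) ∧ K' * K' ≤ (m : Int) ∧ (m : Int) < n + 1
        · rw [if_pos hcond] at h; exact absurd h (by simp)
        · rw [if_neg hcond] at h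
          rcases lt_or_eq_of_le (show (p : Int) ≤ K' by omega) with hlt' | heq
          · exact (IHm.mp h) ⟨p, hp, hlt', hdvd, hle⟩
          · refine hcond ⟨?_, ?_, hmlt⟩
            · rw [← heq]; exact_mod_cast hdvd
            · rw [← heq]; exact_mod_cast hle
      · intro h
        have hnc : ¬ (K' ∣ (m : Int) ∧ K' * K' ≤ (m : Int) ∧ (m : Int) < n + 1) := by
          rintro ⟨h1, h2, -⟩
          refine h ⟨K'.toNat, hKprime, by omega, ?_, ?_⟩
          · have : ((K'.toNat : Int)) ∣ (m : Int) := by rw [hkcast]; exact h1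
            exact_mod_cast this
          · have : ((K'.toNat : Int)) * (K'.toNat : Int) ≤ (m : Int) := by
              rw [hkcast]; exact h2
            exact_mod_cast this
        rw [if_neg hnc]
        refine IHm.mpr ?_
        rintro ⟨p, hp, hplt, hdvd, hle⟩
        exact h ⟨p, hp, by omega, hdvd, hle⟩
    · -- K' already marked: it is composite
      have hex : ∃ p : Nat, p.Prime ∧ (p : Int) < K' ∧ p ∣ K'.toNat ∧ p * p ≤ K'.toNat := by
        by_contra hno
        exact hs (IHk.mpr hno)
      have hKnp : ¬ Nat.Prime K'.toNat := by
        intro hkp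
        obtain ⟨p, hp, hplt, hdvd, hle⟩ := hex
        rcases hkp.eq_one_or_self_of_dvd p hdvd with h1 | h1
        · exact hp.ne_one h1
        · omega
      rw [if_neg hs]
      rw [IHm]
      constructor
      · intro h
        rintro ⟨p, hp, hplt, hdvd, hle⟩
        rcases lt_or_eq_of_le (show (p : Int) ≤ K' by omega) with hlt' | heq
        · exact h ⟨p, hp, hlt', hdvd, hle⟩
        · have : p = K'.toNat := by omega
          exact hKnp (this ▸ hp)
      · intro h
        rintro ⟨p, hp, hplt, hdvd, hle⟩
        exact h ⟨p, hp, by omega, hdvd, hle⟩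

lemma sieveBuild_getD (n : Int) (hn : 1 ≤ n) (m : Nat) (hm2 : 2 ≤ m) (hm : (m : Int) < n + 1) :
    (sieveBuild n).getD m false = decide (Nat.Prime m) := by
  unfold sieveBuild
  have hKM : n + 1 = 2 + (((n - 1).toNat : Int)) := by omega
  rw [Bool.eq_iff_iff, decide_eq_true_iff,
    sieve_inv n hn (n - 1).toNat (n + 1) hKM (le_refl _) m (by omega)]
  rw [prime_iff_no_small_factor m hm2]
  constructor
  · intro h
    rintro ⟨p, hp, hdvd, hle⟩
    have hpm : p ≤ m := le_trans (Nat.le_mul_of_pos_left p hp.pos) hle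
    exact h ⟨p, hp, by omega, hdvd, hle⟩
  · intro h
    rintro ⟨p, hp, -, hdvd, hle⟩
    exact h ⟨p, hp, hdvd, hle⟩

-- step-2 range: nil and cons forms
lemma pyRange_two_nil (a b : Int) (h : b ≤ a) : PySem.List.pyRange a b 2 = [] := by
  rw [PySem.List.pyRange_of_pos a b (by norm_num)]
  simp [not_lt.mpr h]

lemma pyRange_two_cons (a b : Int) (h : a < b) :
    PySem.List.pyRange a b 2 = a :: PySem.List.pyRange (a + 2) b 2 := by
  rw [PySem.List.pyRange_of_pos a b (by norm_num),
    PySem.List.pyRange_of_pos (a + 2) b (by norm_num)]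
  have hcount : (if a < b then ((b - a + 2 - 1) / 2).toNat else 0)
      = (if a + 2 < b then ((b - (a + 2) + 2 - 1) / 2).toNat else 0) + 1 := by
    split_ifs <;> omega
  rw [hcount, List.range_succ_eq_map]
  simp only [List.map_cons, List.map_map]
  congr 1
  · norm_num
  · apply List.map_congr_left
    intro k _
    simp only [Function.comp_apply]
    push_cast
    ring

-- an even integer > 2 is not prime
lemma not_prime_even (x : Int) (h3 : 3 ≤ x) (he : x % 2 = 0) :
    decide (Nat.Prime x.toNat) = false := by
  simp only [decide_eq_false_iff_not]
  have : x.toNat = 2 * (x.toNat / 2) := by omega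
  rw [this]
  exact Nat.not_prime_mul (by norm_num) (by omega)

-- folding the prime-sum over the step-1 range from an odd start ≥ 3 equals folding
-- over the step-2 range (even entries contribute nothing)
lemma fold_odd (n b : Int) :
    ∀ M : Nat, ∀ a : Int, 3 ≤ a → a % 2 = 1 → (b - a).toNat = M → ∀ acc : Int,
    (PySem.List.pyRange a b 1).foldl
      (fun cnt i => if decide (Nat.Prime i.toNat) then cnt + PySem.Int.floordiv n i else cnt) acc
    = (PySem.List.pyRange a b 2).foldl
      (fun cnt i => if decide (Nat.Prime i.toNat) then cnt + PySem.Int.floordiv n i else cnt) acc := by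
  intro M
  induction M using Nat.strong_induction_on with
  | _ M IH =>
    intro a ha hodd hM acc
    by_cases hab : a < b
    · rw [PySem.List.pyRange_one_cons hab, pyRange_two_cons a b hab]
      simp only [List.foldl_cons]
      by_cases h2 : a + 1 < b
      · rw [PySem.List.pyRange_one_cons h2]
        simp only [List.foldl_cons]
        rw [not_prime_even (a + 1) (by omega) (by omega)]
        simp only [Bool.false_eq_true, if_false]
        have h22 : a + 1 + 1 = a + 2 := by ring
        rw [h22]
        exact IH (b - (a + 2)).toNat (by omega) (a + 2) (by omega) (by omega) rfl _
      · rw [PySem.List.pyRange_one_eq_nil (by omega), pyRange_two_nil (a + 2) b (by omega)]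
    · rw [PySem.List.pyRange_one_eq_nil (by omega), pyRange_two_nil a b (by omega)]

-- ζ-reduced form of count_alt for n ≥ 1
lemma count_alt_eq (n : Int) (h : ¬ n < 1) :
    count_alt n
      = (PySem.List.pyRange 2 (n + 1) 1).foldl
          (fun total p => if (sieveBuild n).getD p.toNat false then total + PySem.Int.floordiv n p else total)
          1 := by
  unfold count_alt
  rw [if_neg h]

-- ===== VERDICT (by name: the statement is the Claim_ definition above) =====
theorem count_spec : Claim_equal_count := by
  intro n _
  unfold Spec_count
  by_cases h1 : n < 1
  · unfold count count_alt
    rw [if_pos h1, if_pos h1]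
  · rw [not_lt] at h1
    by_cases hn1 : n = 1
    · subst hn1
      rw [count_alt_eq 1 (by norm_num)]
      unfold count
      rw [if_neg (by norm_num)]
      rw [pyRange_two_nil 3 (1 + 1) (by norm_num), PySem.List.pyRange_one_eq_nil (by norm_num)]
      simp only [List.foldl_nil]
      rw [PySem.Int.floordiv_eq_ediv_of_pos (by norm_num)]
      norm_num
    · have hn2 : 2 ≤ n := by omega
      rw [count_alt_eq n (by omega)]
      unfold count
      rw [if_neg (by omega)]
      simp only [isprime_eq]
      rw [PySem.List.foldl_congr_mem _
        (fun total p => if (sieveBuild n).getD p.toNat false then total + PySem.Int.floordiv n p else total)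
        (fun total p => if decide (Nat.Prime p.toNat) then total + PySem.Int.floordiv n p else total)
        1
        (by
          intro acc p hp
          rcases PySem.List.mem_pyRange_one.mp hp with ⟨hp2, hpn⟩
          simp only [sieveBuild_getD n (by omega) p.toNat (by omega) (by omega)])]
      rw [PySem.List.pyRange_one_cons (show (2:Int) < n + 1 by omega)]
      simp only [List.foldl_cons]
      have h2p : decide (Nat.Prime (2:Int).toNat) = true := by decide
      rw [h2p, if_pos (show (true = true) from rfl)]
      have h3 : (2:Int) + 1 = 3 := by norm_num
      rw [h3]
      exact (fold_odd n (n + 1) (n + 1 - 3).toNat 3 (by omega) (by omega) rfl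
        (1 + PySem.Int.floordiv n 2)).symm
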